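-- pv_equiv track=rewrite | github.com/MichaelsEngineering/grokking-mechanism-test | src/scripts/visualize.py | _group_by_split
-- ===== SOURCE A (Python) =====
-- from typing import Dict, List, Optional, Sequence
--
-- def _group_by_split(rows: List[Dict[str, str]]) -> Dict[str, List[Dict[str, str]]]:
--     grouped: Dict[str, List[Dict[str, str]]] = {}
--     for row in rows:
--         split = row.get("split", "train")
--         grouped.setdefault(split, []).append(row)
--     for values in grouped.values():
--         values.sort(key=lambda r: int(r.get("step", 0) or 0))
--     return grouped
-- ===== SOURCE B (Python) =====
-- def _group_by_split(rows):
--     keys = list(dict.fromkeys(r.get("split", "train") for r in rows))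
--     return {
--         k: sorted(
--             (r for r in rows if r.get("split", "train") == k),
--             key=lambda r: int(r.get("step", 0) or 0),
--         )
--         for k in keys
--     }
-- ===== Notes on version B (the rewrite author's own statement) =====
-- stated objective: simpler
-- what changed: A builds the groups by mutating a dict row-by-row and then sorts each group list in place; B never mutates: it computes the first-occurrence key list once, then produces the result in one dict comprehension that filters and sorts the rows per key.
import Mathlib
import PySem

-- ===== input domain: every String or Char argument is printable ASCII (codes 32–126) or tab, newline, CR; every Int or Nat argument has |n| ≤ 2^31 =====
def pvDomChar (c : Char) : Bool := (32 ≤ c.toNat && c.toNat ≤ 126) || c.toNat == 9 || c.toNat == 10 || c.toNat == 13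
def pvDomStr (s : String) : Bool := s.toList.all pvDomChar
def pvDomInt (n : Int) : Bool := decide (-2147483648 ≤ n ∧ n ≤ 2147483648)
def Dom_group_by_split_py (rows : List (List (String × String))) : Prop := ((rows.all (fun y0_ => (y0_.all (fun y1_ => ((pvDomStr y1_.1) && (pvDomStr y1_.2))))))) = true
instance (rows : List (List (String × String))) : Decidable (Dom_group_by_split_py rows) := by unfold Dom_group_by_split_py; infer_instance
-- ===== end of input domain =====

-- B replaces A's row-by-row dict mutation + per-group in-place sorts by a pure comprehension:
-- first-occurrence key list once, then per key a filter of the rows, sorted. Return value only: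
-- A sorts its group lists in place, B does not mutate. Objective: simpler, same order of cost.

-- row.get("split", "train")
def pvSplit (row : List (String × String)) : String :=
  PySem.Dict.getD (PySem.Dict.mk row) "split" "train"

-- int(row.get("step", 0) or 0); outside Pre_ (int() raising) the Option default 0 is never used
def pvStepKey (row : List (String × String)) : Int :=
  match PySem.Dict.get? (PySem.Dict.mk row) "step" with
  | none => 0
  | some s => if s = "" then 0 else (PySem.Int.ofStr? s).getD 0

-- ===== PORT A =====
def group_by_split_py (rows : List (List (String × String))) : List (String × List (List (String × String))) :=
  -- grouped.setdefault(split, []).append(row)  ≡  grouped[split] = grouped.get(split, []) + [row]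
  let grouped := rows.foldl (fun d row => d.modify (pvSplit row) [] (fun vs => vs ++ [row])) PySem.Dict.empty
  -- for values in grouped.values(): values.sort(key=…)
  grouped.items.map (fun p => (p.1, PySem.List.sorted p.2 pvStepKey))

-- ===== PORT B =====
def group_by_split_py_alt (rows : List (List (String × String))) : List (String × List (List (String × String))) :=
  -- keys = list(dict.fromkeys(r.get("split","train") for r in rows))
  let keys := PySem.Set.ofList (rows.map pvSplit)
  -- {k: sorted((r for r in rows if r.get("split","train") == k), key=step_key) for k in keys}
  keys.map (fun k => (k, PySem.List.sorted (rows.filter (fun r => pvSplit r == k)) pvStepKey))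

-- ===== PRECONDITION & SPEC =====
-- Pre_ excludes exactly the rows whose non-empty "step" value is not int()-parsable: there Python A
-- (and Python B alike) raises ValueError.
def Pre_group_by_split_py (rows : List (List (String × String))) : Prop :=
  (rows.all (fun row =>
    match PySem.Dict.get? (PySem.Dict.mk row) "step" with
    | none => true
    | some s => (s == "") || (PySem.Int.ofStr? s).isSome)) = true
instance (rows : List (List (String × String))) : Decidable (Pre_group_by_split_py rows) := by unfold Pre_group_by_split_py; infer_instance

def pvWitness_group_by_split_py : (List (List (String × String))) :=
  [[("split", "val"), ("step", "2")], [("step", "1")], [("split", "val"), ("step", "")], [("other", "x")]]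

def Spec_group_by_split_py (rows : List (List (String × String))) (out : List (String × List (List (String × String)))) : Prop := out = group_by_split_py_alt rows
instance (rows : List (List (String × String))) (out : List (String × List (List (String × String)))) : Decidable (Spec_group_by_split_py rows out) := by unfold Spec_group_by_split_py; infer_instance

-- ===== CLAIM (what is proved, stated in full; the proofs are below) =====
def Claim_equal_group_by_split_py : Prop := ∀ (rows : List (List (String × String))), Dom_group_by_split_py rows → Pre_group_by_split_py rows → Spec_group_by_split_py rows (group_by_split_py rows)

-- ===== LEMMAS AND PROOFS =====

-- A's result, characterised: keys in first-occurrence order, each group filtered then sorted —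
-- which is exactly B's comprehension.
theorem pv_A_char (rows : List (List (String × String))) :
    group_by_split_py rows =
      (PySem.Set.ofList (rows.map pvSplit)).map
        (fun k => (k, PySem.List.sorted (rows.filter (fun r => pvSplit r == k)) pvStepKey)) := by
  simp only [group_by_split_py]
  have hfold : rows.foldl (fun d row => d.modify (pvSplit row) [] (fun vs => vs ++ [row]))
      (PySem.Dict.empty : PySem.Dict String (List (List (String × String)))) =
      (rows.map (fun r => (pvSplit r, r))).foldl (fun d p => d.modify p.1 [] (fun vs => vs ++ [p.2])) PySem.Dict.empty := by
    rw [List.foldl_map]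
  have hnodup : (rows.foldl (fun d row => d.modify (pvSplit row) [] (fun vs => vs ++ [row]))
      (PySem.Dict.empty : PySem.Dict String (List (List (String × String))))).keys.Nodup :=
    PySem.Dict.nodup_keys_foldl_modify_key rows pvSplit [] (fun _ x vs => vs ++ [x]) _ (by simp)
  rw [PySem.Dict.items_eq_map_keys _ hnodup []]
  rw [PySem.Dict.keys_foldl_modify_key rows pvSplit [] (fun _ x vs => vs ++ [x])]
  simp only [PySem.Dict.keys_empty]
  rw [show PySem.Set.update ([] : PySem.Set String) (rows.map pvSplit) = PySem.Set.ofList (rows.map pvSplit) from rfl]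
  rw [List.map_map]
  apply List.map_congr_left
  intro k _
  simp only [Function.comp]
  congr 1
  rw [hfold, PySem.Dict.getD_foldl_modify_append]
  simp [List.filter_map, Function.comp_def]

-- ===== VERDICT (by name: the statement is the Claim_ definition above) =====
theorem group_by_split_py_spec : Claim_equal_group_by_split_py := by
  intro rows _ _
  show group_by_split_py rows = group_by_split_py_alt rows
  rw [pv_A_char]
  rfl
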